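-- pv_equiv track=rewrite | github.com/Vjais/CS-583-MS-Apriori-Algorithm | run.py | supp_of_seq
-- ===== SOURCE A (Python) =====
-- def supp_of_seq(seq, data):
--     n = 0
--     for i in data:
--         for j in seq:
--             if j not in i:
--                 break
--         else:
--             n = n + 1
--     return n
-- ===== SOURCE B (Python) =====
-- def supp_of_seq(seq, data):
--     acc = set(range(len(data)))
--     for j in seq:
--         acc = {idx for idx in acc if j in data[idx]}
--     return len(acc)
-- ===== Notes on version B (the rewrite author's own statement) =====
-- stated objective: alternative
-- what changed: Item-major traversal maintaining a shrinking set of transaction indices (initialized to all indices, filtered per item), replacing A's transaction-major loop with an inner early-break scan and a running counter.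
import Mathlib
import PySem

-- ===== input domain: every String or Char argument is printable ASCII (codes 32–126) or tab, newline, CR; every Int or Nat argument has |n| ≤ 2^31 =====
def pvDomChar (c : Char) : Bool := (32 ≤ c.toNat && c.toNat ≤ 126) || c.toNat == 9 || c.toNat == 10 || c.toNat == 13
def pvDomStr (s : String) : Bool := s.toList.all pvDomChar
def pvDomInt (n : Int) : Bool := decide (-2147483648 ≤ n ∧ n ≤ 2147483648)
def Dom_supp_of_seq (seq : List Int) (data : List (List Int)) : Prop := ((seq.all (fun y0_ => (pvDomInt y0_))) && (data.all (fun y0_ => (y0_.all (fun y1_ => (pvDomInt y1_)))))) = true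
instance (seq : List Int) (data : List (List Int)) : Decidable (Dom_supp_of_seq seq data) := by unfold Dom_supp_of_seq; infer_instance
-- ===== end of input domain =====

-- B: item-major traversal over a shrinking set of transaction indices (alternative decomposition, same cost).

-- ===== PORT A =====
-- inner 'for j in seq: if j not in i: break / else:' — returns true iff the loop ran to completion
def pvCheckSeq (seq : List Int) (i : List Int) : Bool :=
  match seq with
  | [] => true
  | j :: rest => if j ∉ i then false else pvCheckSeq rest i

def supp_of_seq (seq : List Int) (data : List (List Int)) : Int :=
  data.foldl (fun n i => if pvCheckSeq seq i then n + 1 else n) 0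

-- ===== PORT B =====
-- acc = set(range(len(data))); for j in seq: acc = {idx for idx in acc if j in data[idx]}; return len(acc)
-- indices in acc are always < data.length, so data[idx] is ported as data.getD idx []
def supp_of_seq_alt (seq : List Int) (data : List (List Int)) : Int :=
  (seq.foldl (fun acc j => acc.filter (fun idx => decide (j ∈ data.getD idx [])))
    (List.range data.length)).length

-- ===== PRECONDITION & SPEC =====
def Spec_supp_of_seq (seq : List Int) (data : List (List Int)) (out : Int) : Prop := out = supp_of_seq_alt seq data
instance (seq : List Int) (data : List (List Int)) (out : Int) : Decidable (Spec_supp_of_seq seq data out) := by unfold Spec_supp_of_seq; infer_instance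

-- ===== CLAIM (what is proved, stated in full; the proofs are below) =====
def Claim_equal_supp_of_seq : Prop := ∀ (seq : List Int) (data : List (List Int)), Dom_supp_of_seq seq data → Spec_supp_of_seq seq data (supp_of_seq seq data)

-- ===== LEMMAS AND PROOFS =====

theorem pvCheckSeq_eq_all (seq i : List Int) :
    pvCheckSeq seq i = seq.all (fun j => decide (j ∈ i)) := by
  induction seq with
  | nil => rfl
  | cons j rest ih =>
    simp [pvCheckSeq, List.all_cons, ih]

theorem foldl_count (seq : List Int) (data : List (List Int)) (c : Int) :
    data.foldl (fun n i => if pvCheckSeq seq i then n + 1 else n) c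
      = c + (data.filter (fun i => pvCheckSeq seq i)).length := by
  induction data generalizing c with
  | nil => simp
  | cons t rest ih =>
    by_cases h : pvCheckSeq seq t = true <;>
      simp [List.foldl_cons, h, ih]; ring

theorem foldl_filter (data : List (List Int)) (seq : List Int) (init : List Nat) :
    seq.foldl (fun acc j => acc.filter (fun idx => decide (j ∈ data.getD idx []))) init
      = init.filter (fun idx => seq.all (fun j => decide (j ∈ data.getD idx []))) := by
  induction seq generalizing init with
  | nil => simp
  | cons j rest ih =>
    simp only [List.foldl_cons, ih, List.filter_filter]
    congr 1
    funext idx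
    simp [List.all_cons, Bool.and_comm]

theorem range_filter (data : List (List Int)) (q : List Int → Bool) :
    ((List.range data.length).filter (fun idx => q (data.getD idx []))).length
      = (data.filter q).length := by
  induction data with
  | nil => simp
  | cons t rest ih =>
    rw [List.length_cons, List.range_succ_eq_map]
    simp only [List.filter_cons, List.getD_cons_zero, List.filter_map,
      Function.comp_def, List.getD_cons_succ]
    simp only [List.getD] at ih ⊢
    by_cases h : q t = true <;> simp [h, ih]

-- ===== VERDICT (by name: the statement is the Claim_ definition above) =====
theorem supp_of_seq_spec : Claim_equal_supp_of_seq := by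
  intro seq data _
  unfold Spec_supp_of_seq supp_of_seq supp_of_seq_alt
  rw [foldl_count, foldl_filter]
  simp only [pvCheckSeq_eq_all, zero_add]
  exact_mod_cast (range_filter data (fun t => seq.all (fun j => decide (j ∈ t)))).symm
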